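-- pv_equiv track=rewrite | github.com/etymology/dune_winder_p3 | src/dune_winder/gcode/parser.py | _tokenize_line
-- ===== SOURCE A (Python) =====
-- def _tokenize_line(line: str) -> list[tuple[str, str]]:
--   tokens: list[tuple[str, str]] = []
--   current: list[str] = []
--   index = 0
--   while index < len(line):
--     character = line[index]
--
--     if "(" == character:
--       if current:
--         tokens.append(("token", "".join(current)))
--         current = []
--
--       closing = line.find(")", index + 1)
--       if -1 == closing:
--         comment = line[index + 1 :]
--         index = len(line)
--       else:
--         comment = line[index + 1 : closing]
--         index = closing + 1
--
--       tokens.append(("comment", comment))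
--       continue
--
--     if character.isspace():
--       if current:
--         tokens.append(("token", "".join(current)))
--         current = []
--       index += 1
--       continue
--
--     current.append(character)
--     index += 1
--
--   if current:
--     tokens.append(("token", "".join(current)))
--
--   return tokens
-- ===== SOURCE B (Python) =====
-- def _tokenize_line(line: str) -> list[tuple[str, str]]:
--   # find/split based tokenizer: no per-character state machine
--   tokens: list[tuple[str, str]] = []
--   index = 0
--   while True:
--     opening = line.find("(", index)
--     if opening == -1:
--       tokens.extend(("token", word) for word in line[index:].split())
--       return tokens
--     tokens.extend(("token", word) for word in line[index:opening].split())
--     closing = line.find(")", opening + 1)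
--     if closing == -1:
--       tokens.append(("comment", line[opening + 1:]))
--       return tokens
--     tokens.append(("comment", line[opening + 1:closing]))
--     index = closing + 1
-- ===== Notes on version B (the rewrite author's own statement) =====
-- stated objective: simpler
-- what changed: Replaces the per-character state machine (explicit index, current-token accumulator, isspace branches) with a loop that jumps between comments via str.find and tokenizes each plain segment with str.split.
import Mathlib
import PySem

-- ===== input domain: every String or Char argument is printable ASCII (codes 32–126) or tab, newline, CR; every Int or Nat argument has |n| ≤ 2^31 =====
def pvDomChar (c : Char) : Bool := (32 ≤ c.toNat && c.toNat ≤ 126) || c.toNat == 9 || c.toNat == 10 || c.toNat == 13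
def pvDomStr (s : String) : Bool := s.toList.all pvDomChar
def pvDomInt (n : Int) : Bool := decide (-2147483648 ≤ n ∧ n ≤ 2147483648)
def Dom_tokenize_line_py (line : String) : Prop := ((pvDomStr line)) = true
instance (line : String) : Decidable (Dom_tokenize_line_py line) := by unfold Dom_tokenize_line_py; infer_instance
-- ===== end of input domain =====

-- B replaces A's per-character state machine by str.find-located comments and str.split-tokenized
-- segments between them: simpler (shorter, uses the library) and the same exact output.

-- Helper lemma both ports' termination needs: a found single-character needle lies inside the list.
theorem pvFindGoChar (c : Char) : ∀ (s : List Char) (k : Nat),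
    (c ∉ s ∧ PySem.Chars.find.go [c] s k = -1) ∨
    (∃ pre post, s = pre ++ c :: post ∧ c ∉ pre ∧
      PySem.Chars.find.go [c] s k = (k : Int) + pre.length) := by
  intro s
  induction s with
  | nil => intro k; exact Or.inl ⟨by simp, by simp [PySem.Chars.find.go]⟩
  | cons h t ih =>
    intro k
    by_cases hc : c = h
    · subst hc
      refine Or.inr ⟨[], t, by simp, by simp, ?_⟩
      simp [PySem.Chars.find.go, List.isPrefixOf]
    · have hgo : PySem.Chars.find.go [c] (h :: t) k = PySem.Chars.find.go [c] t (k + 1) := by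
        simp [PySem.Chars.find.go, List.isPrefixOf, hc]
      rcases ih (k + 1) with ⟨hni, he⟩ | ⟨pre, post, hsp, hnp, he⟩
      · exact Or.inl ⟨by simp [hc, hni], by rw [hgo, he]⟩
      · refine Or.inr ⟨h :: pre, post, by simp [hsp], by simp [hc, hnp], ?_⟩
        rw [hgo, he]; simp; omega

theorem pvFindChar (c : Char) (s : List Char) :
    (c ∉ s ∧ PySem.Chars.find s [c] = -1) ∨
    (∃ pre post, s = pre ++ c :: post ∧ c ∉ pre ∧
      PySem.Chars.find s [c] = pre.length) := by
  have := pvFindGoChar c s 0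
  simpa [PySem.Chars.find] using this

theorem pvFindCharLt (c : Char) (s : List Char) (h : PySem.Chars.find s [c] ≠ -1) :
    (PySem.Chars.find s [c]).toNat < s.length := by
  rcases pvFindChar c s with ⟨_, he⟩ | ⟨pre, post, hsp, _, he⟩
  · exact absurd he h
  · rw [he, hsp]; simp

-- ===== PORT A =====
-- A's while-loop over an integer index is transcribed as recursion over the remaining suffix
-- `cs = line[index:]`: `line[index]` is the head, `line.find(")", index + 1)` is
-- `Chars.find rest [')']` shifted by index+1, and the slices `line[index+1:]`,
-- `line[index+1:closing]` and the jump to `closing+1` are the matching take/drop of `rest`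
-- (all offsets are nonnegative, where Python slicing is exactly take/drop).
def pvTokA : List Char → List Char → List (String × String)
  | [], current => if current.isEmpty then [] else [("token", String.ofList current)]
  | c :: rest, current =>
    if c = '(' then
      (if current.isEmpty then [] else [("token", String.ofList current)]) ++
      (let f := PySem.Chars.find rest [')']
       if f = -1 then
         [("comment", String.ofList rest)]
       else
         ("comment", String.ofList (rest.take f.toNat)) :: pvTokA (rest.drop (f.toNat + 1)) [])
    else if PySem.Chars.isspace c then
      (if current.isEmpty then [] else [("token", String.ofList current)]) ++ pvTokA rest []
    else
      pvTokA rest (current ++ [c])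
termination_by cs _ => cs.length
decreasing_by
  all_goals (simp; try omega)

def tokenize_line_py (line : String) : List (String × String) := pvTokA line.toList []

-- ===== PORT B =====
-- B's while-True loop over `index` is likewise transcribed on the suffix `cs = line[index:]`:
-- line.find("(", index) is `Chars.find cs ['(']`, the segment line[index:opening] is
-- `cs.take`, and line[opening+1:...] / index = closing+1 are the matching take/drop.
def pvTokB (cs : List Char) : List (String × String) :=
  let o := PySem.Chars.find cs ['(']
  if _ho : o = -1 then
    (PySem.Chars.split₀ cs).map (fun w => ("token", String.ofList w))
  else
    ((PySem.Chars.split₀ (cs.take o.toNat)).map (fun w => ("token", String.ofList w))) ++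
    (let rest := cs.drop (o.toNat + 1)
     let f := PySem.Chars.find rest [')']
     if f = -1 then
       [("comment", String.ofList rest)]
     else
       ("comment", String.ofList (rest.take f.toNat)) :: pvTokB (rest.drop (f.toNat + 1)))
termination_by cs.length
decreasing_by
  have := pvFindCharLt '(' cs _ho
  simp; omega

def tokenize_line_py_alt (line : String) : List (String × String) := pvTokB line.toList

-- ===== PRECONDITION & SPEC =====
def Spec_tokenize_line_py (line : String) (out : List (String × String)) : Prop := out = tokenize_line_py_alt line
instance (line : String) (out : List (String × String)) : Decidable (Spec_tokenize_line_py line out) := by unfold Spec_tokenize_line_py; infer_instance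

-- ===== CLAIM (what is proved, stated in full; the proofs are below) =====
def Claim_equal_tokenize_line_py : Prop := ∀ (line : String), Dom_tokenize_line_py line → Spec_tokenize_line_py line (tokenize_line_py line)

-- ===== LEMMAS AND PROOFS =====

-- A's paren branch, as a named piece so the segment lemma below can factor it out.
def pvParen (post : List Char) : List (String × String) :=
  let f := PySem.Chars.find post [')']
  if f = -1 then
    [("comment", String.ofList post)]
  else
    ("comment", String.ofList (post.take f.toNat)) :: pvTokA (post.drop (f.toNat + 1)) []

theorem pvSplitGoAcc : ∀ (cs cur : List Char) (acc : List (List Char)),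
    PySem.Chars.split₀.go cs cur acc = acc.reverse ++ PySem.Chars.split₀.go cs cur [] := by
  intro cs
  induction cs with
  | nil =>
    intro cur acc
    by_cases h : cur.isEmpty <;> simp [PySem.Chars.split₀.go, h]
  | cons c rest ih =>
    intro cur acc
    by_cases hs : PySem.Chars.isspace c
    · by_cases h : cur.isEmpty
      · simp [PySem.Chars.split₀.go, hs, h]; rw [ih [] acc]
      · simp only [PySem.Chars.split₀.go, hs, h, if_true, if_false, Bool.false_eq_true]
        rw [ih [] (cur.reverse :: acc), ih [] [cur.reverse]]
        simp
    · simp only [PySem.Chars.split₀.go, hs, Bool.false_eq_true, if_false]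
      rw [ih (c :: cur) acc]

-- On a paren-free suffix, A's state machine is exactly split₀'s accumulator loop
-- (A's `current` is split₀.go's `cur`, reversed).
theorem pvTokA_noparen : ∀ (cs cur : List Char), '(' ∉ cs →
    pvTokA cs cur =
      (PySem.Chars.split₀.go cs cur.reverse []).map (fun w => ("token", String.ofList w)) := by
  intro cs
  induction cs with
  | nil =>
    intro cur _
    by_cases h : cur.isEmpty <;>
      simp [pvTokA, PySem.Chars.split₀.go, h, List.isEmpty_reverse]
  | cons c rest ih =>
    intro cur hnp
    have hc : c ≠ '(' := by intro h; exact hnp (by simp [h])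
    have hrest : '(' ∉ rest := fun h => hnp (by simp [h])
    by_cases hs : PySem.Chars.isspace c
    · by_cases h : cur.isEmpty
      · have hcur : cur = [] := by simpa using h
        simp [pvTokA, hc, hs, PySem.Chars.split₀.go, hcur, ih [] hrest]
      · simp only [pvTokA, hc, if_false, hs, if_true, h, Bool.false_eq_true]
        rw [ih [] hrest]
        simp only [PySem.Chars.split₀.go, hs, if_true, List.isEmpty_reverse, h,
          Bool.false_eq_true, if_false]
        rw [pvSplitGoAcc _ [] [cur.reverse.reverse]]
        simp
    · simp only [pvTokA, hc, if_false, hs, Bool.false_eq_true]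
      rw [ih (cur ++ [c]) hrest]
      simp [PySem.Chars.split₀.go, hs]

-- Up to the first '(', A's state machine emits split₀'s tokens, then A's paren branch.
theorem pvTokA_paren : ∀ (pre post cur : List Char), '(' ∉ pre →
    pvTokA (pre ++ '(' :: post) cur =
      (PySem.Chars.split₀.go pre cur.reverse []).map (fun w => ("token", String.ofList w)) ++
        pvParen post := by
  intro pre
  induction pre with
  | nil =>
    intro post cur _
    by_cases h : cur.isEmpty <;>
      simp [pvTokA, pvParen, PySem.Chars.split₀.go, h, List.isEmpty_reverse]
  | cons c rest ih =>
    intro post cur hnp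
    have hc : c ≠ '(' := by intro h; exact hnp (by simp [h])
    have hrest : '(' ∉ rest := fun h => hnp (by simp [h])
    by_cases hs : PySem.Chars.isspace c
    · by_cases h : cur.isEmpty
      · have hcur : cur = [] := by simpa using h
        simp only [List.cons_append, pvTokA, hc, if_false, hs, if_true, h]
        rw [ih post [] hrest]
        simp [PySem.Chars.split₀.go, hs, hcur]
      · simp only [List.cons_append, pvTokA, hc, if_false, hs, if_true, h,
          Bool.false_eq_true]
        rw [ih post [] hrest]
        simp only [PySem.Chars.split₀.go, hs, if_true, List.isEmpty_reverse, h,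
          Bool.false_eq_true, if_false]
        rw [pvSplitGoAcc _ [] [cur.reverse.reverse]]
        simp
    · simp only [List.cons_append, pvTokA, hc, if_false, hs, Bool.false_eq_true]
      rw [ih post (cur ++ [c]) hrest]
      simp [PySem.Chars.split₀.go, hs]

theorem pvTok_main : ∀ (n : Nat) (cs : List Char), cs.length ≤ n → pvTokA cs [] = pvTokB cs := by
  intro n
  induction n with
  | zero =>
    intro cs h
    have : cs = [] := by simpa using List.length_eq_zero_iff.mp (Nat.le_zero.mp h)
    subst this
    simp [pvTokA, pvTokB, PySem.Chars.find, PySem.Chars.find.go, PySem.Chars.split₀,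
      PySem.Chars.split₀.go]
  | succ n ih =>
    intro cs hlen
    rcases pvFindChar '(' cs with ⟨hni, he⟩ | ⟨pre, post, hsp, hnp, he⟩
    · rw [pvTokB]
      simp only [he, dite_true]
      rw [pvTokA_noparen cs [] hni]
      simp [PySem.Chars.split₀]
    · have hto : (PySem.Chars.find cs ['(']).toNat = pre.length := by rw [he]; simp
      have hne : PySem.Chars.find cs ['('] ≠ -1 := by
        rw [he]; intro hcontra; omega
      rw [pvTokB]
      simp only [hne, dite_false]
      have htake : cs.take (PySem.Chars.find cs ['(']).toNat = pre := by
        rw [hto, hsp]; simp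
      have hdrop : cs.drop ((PySem.Chars.find cs ['(']).toNat + 1) = post := by
        rw [hto, hsp, show pre ++ '('::post = (pre ++ ['(']) ++ post by simp,
          show pre.length + 1 = (pre ++ ['(']).length by simp]
        exact List.drop_left
      rw [htake, hdrop, hsp, pvTokA_paren pre post [] hnp]
      simp only [PySem.Chars.split₀, List.reverse_nil]
      congr 1
      rw [pvParen]
      by_cases hf : PySem.Chars.find post [')'] = -1
      · simp [hf]
      · simp only [hf, if_false]
        congr 1
        apply ih
        have h1 : (pre ++ '(' :: post).length = pre.length + post.length + 1 := by
          simp; omega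
        have h2 : (post.drop ((PySem.Chars.find post [')']).toNat + 1)).length
            = post.length - ((PySem.Chars.find post [')']).toNat + 1) :=
          List.length_drop
        rw [hsp] at hlen
        simp at hlen
        omega

-- ===== VERDICT (by name: the statement is the Claim_ definition above) =====
theorem tokenize_line_py_spec : Claim_equal_tokenize_line_py := by
  intro line _
  unfold Spec_tokenize_line_py tokenize_line_py tokenize_line_py_alt
  exact pvTok_main line.toList.length line.toList le_rfl
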